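-- pv_equiv track=rewrite | github.com/Allibibo/KI_mietpreis_prognose | city_data_service.py | _add_if_nearer
-- ===== SOURCE A (Python) =====
-- def _add_if_nearer(num_cities, nearest_city_list, new_city):
--     data_list = nearest_city_list.copy()
--     if len(data_list) == 0:
--         data_list.append(new_city)
--         return data_list
--     if new_city["distance"] < data_list[-1]["distance"]:
--         if len(data_list) >= num_cities:
--             data_list.pop(-1)
--         run = 0
--         while 0 <= run < len(data_list):
--             if new_city["distance"] < data_list[run]["distance"]:
--                 data_list.insert(run, new_city)
--                 run = -1
--             else:
--                 run += 1
--         if run == len(data_list):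
--             data_list.append(new_city)
--     return data_list
-- ===== SOURCE B (Python) =====
-- def _place(new_city, cities, budget):
--     if not cities or budget == 0:
--         return [new_city]
--     head = cities[0]
--     if new_city["distance"] < head["distance"]:
--         return [new_city] + cities[:budget]
--     return [head] + _place(new_city, cities[1:], budget - 1)
--
--
-- def _add_if_nearer(num_cities, nearest_city_list, new_city):
--     if len(nearest_city_list) == 0:
--         return [new_city]
--     if new_city["distance"] >= nearest_city_list[-1]["distance"]:
--         return list(nearest_city_list)
--     budget = len(nearest_city_list) - 1 if len(nearest_city_list) >= num_cities else len(nearest_city_list)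
--     return _place(new_city, nearest_city_list, budget)
-- ===== Notes on version B (the rewrite author's own statement) =====
-- stated objective: alternative
-- what changed: A works in three staged in-place mutations on a copy (pop(-1) when at capacity, a while-loop with a run counter reset to -1 to signal the insert, then a conditional append); B has no mutation and no staging: after the two guards it makes a single pure recursive pass over the ORIGINAL list carrying a remaining-budget counter that fuses the capacity drop, the insertion point and the trailing append into one traversal.
import Mathlib
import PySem

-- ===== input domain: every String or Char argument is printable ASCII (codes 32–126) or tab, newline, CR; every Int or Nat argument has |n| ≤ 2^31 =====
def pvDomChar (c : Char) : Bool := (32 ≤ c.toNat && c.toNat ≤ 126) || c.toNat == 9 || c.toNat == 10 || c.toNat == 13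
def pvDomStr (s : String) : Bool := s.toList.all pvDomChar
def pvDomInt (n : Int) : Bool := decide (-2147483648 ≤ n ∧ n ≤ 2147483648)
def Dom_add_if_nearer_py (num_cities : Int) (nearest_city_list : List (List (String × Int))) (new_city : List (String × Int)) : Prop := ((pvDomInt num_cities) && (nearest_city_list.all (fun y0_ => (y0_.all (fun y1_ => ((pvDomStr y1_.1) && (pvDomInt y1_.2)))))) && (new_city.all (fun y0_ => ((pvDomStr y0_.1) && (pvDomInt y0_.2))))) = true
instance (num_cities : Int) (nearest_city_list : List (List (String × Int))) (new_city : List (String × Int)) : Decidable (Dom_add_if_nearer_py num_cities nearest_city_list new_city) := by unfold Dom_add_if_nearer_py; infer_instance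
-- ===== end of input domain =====

-- B replaces A's three staged in-place mutations (pop(-1), while-scan with run = -1 exit
-- signal + insert, conditional append) by one pure recursion over the ORIGINAL list carrying a
-- remaining-budget counter that fuses cap-drop, insertion and append; return values only (A
-- mutates only its private copy, so this is full equivalence).

-- ===== PORT A =====
-- shared accessor: c["distance"] with first-match dict lookup; value outside Pre_ is irrelevant
def pvDist (c : List (String × Int)) : Int :=
  ((PySem.Dict.mk c).get? "distance").getD 0

-- the while-loop of A: run counter scans data_list; on insert Python sets run = -1 and the
-- loop condition 0 <= run immediately fails, so we return (inserted list, -1); otherwise the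
-- loop ends with run = len(data_list) and we return (list, run)
def aScan (nd : Int) (nc : List (String × Int)) (l : List (List (String × Int))) (run : Nat) :
    List (List (String × Int)) × Int :=
  if h : run < l.length then
    if nd < pvDist l[run] then (l.insertIdx run nc, -1)
    else aScan nd nc l (run + 1)
  else (l, (run : Int))
termination_by l.length - run

def add_if_nearer_py (num_cities : Int) (nearest_city_list : List (List (String × Int))) (new_city : List (String × Int)) : List (List (String × Int)) :=
  let data_list := nearest_city_list   -- .copy(); no aliasing in Lean
  if data_list.length = 0 then
    data_list ++ [new_city]
  else if pvDist new_city < pvDist (PySem.List.pyGetD data_list (-1) []) then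
    let data_list :=
      if (data_list.length : Int) ≥ num_cities then
        match PySem.List.pop? data_list (-1) with   -- data_list.pop(-1)
        | some (_, rest) => rest
        | none => data_list                          -- unreachable: list nonempty
      else data_list
    let res := aScan (pvDist new_city) new_city data_list 0
    if res.2 = (res.1.length : Int) then res.1 ++ [new_city] else res.1
  else data_list

-- ===== PORT B =====
-- _place(new_city, cities, budget): one recursion fusing insertion and the cap truncation
def bPlace (nc : List (String × Int)) (cities : List (List (String × Int))) (budget : Nat) :
    List (List (String × Int)) :=
  match cities, budget with
  | [], _ => [nc]
  | _ :: _, 0 => [nc]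
  | head :: rest, b + 1 =>
    if pvDist nc < pvDist head then nc :: (head :: rest).take (b + 1)   -- [new] + cities[:budget]
    else head :: bPlace nc rest b

def add_if_nearer_py_alt (num_cities : Int) (nearest_city_list : List (List (String × Int))) (new_city : List (String × Int)) : List (List (String × Int)) :=
  if nearest_city_list.length = 0 then
    [new_city]
  else if pvDist (PySem.List.pyGetD nearest_city_list (-1) []) ≤ pvDist new_city then
    nearest_city_list                                   -- list(...) copy; values equal
  else
    let budget : Nat :=
      if (nearest_city_list.length : Int) ≥ num_cities then nearest_city_list.length - 1
      else nearest_city_list.length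
    bPlace new_city nearest_city_list budget

-- ===== PRECONDITION & SPEC =====
-- does this dict carry the "distance" key?
def pvHasD (c : List (String × Int)) : Bool := ((PySem.Dict.mk c).get? "distance").isSome

-- Pre_ excludes exactly the inputs on which the Python A raises KeyError: a "distance" key
-- missing from new_city, from the last element, or from an element the insertion scan reads
-- (the first element of the kept list that is missing the key or strictly farther); B raises
-- KeyError on exactly the same inputs.
def Pre_add_if_nearer_py (num_cities : Int) (nearest_city_list : List (List (String × Int))) (new_city : List (String × Int)) : Prop :=
  nearest_city_list = [] ∨
    (pvHasD new_city = true ∧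
     pvHasD (PySem.List.pyGetD nearest_city_list (-1) []) = true ∧
     (pvDist new_city < pvDist (PySem.List.pyGetD nearest_city_list (-1) []) →
       ∀ c ∈ (if (nearest_city_list.length : Int) ≥ num_cities then
                nearest_city_list.dropLast else nearest_city_list).find?
               (fun c => !pvHasD c || decide (pvDist new_city < pvDist c)),
         pvHasD c = true))
instance (num_cities : Int) (nearest_city_list : List (List (String × Int))) (new_city : List (String × Int)) : Decidable (Pre_add_if_nearer_py num_cities nearest_city_list new_city) := by unfold Pre_add_if_nearer_py; infer_instance

def pvWitness_add_if_nearer_py : Int × (List (List (String × Int))) × (List (String × Int)) :=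
  (2, [[("distance", 1)], [("distance", 5)]], [("distance", 3)])

def Spec_add_if_nearer_py (num_cities : Int) (nearest_city_list : List (List (String × Int))) (new_city : List (String × Int)) (out : List (List (String × Int))) : Prop := out = add_if_nearer_py_alt num_cities nearest_city_list new_city
instance (num_cities : Int) (nearest_city_list : List (List (String × Int))) (new_city : List (String × Int)) (out : List (List (String × Int))) : Decidable (Spec_add_if_nearer_py num_cities nearest_city_list new_city out) := by unfold Spec_add_if_nearer_py; infer_instance

-- ===== CLAIM (what is proved, stated in full; the proofs are below) =====
def Claim_equal_add_if_nearer_py : Prop := ∀ (num_cities : Int) (nearest_city_list : List (List (String × Int))) (new_city : List (String × Int)), Dom_add_if_nearer_py num_cities nearest_city_list new_city → Pre_add_if_nearer_py num_cities nearest_city_list new_city → Spec_add_if_nearer_py num_cities nearest_city_list new_city (add_if_nearer_py num_cities nearest_city_list new_city)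

-- ===== LEMMAS AND PROOFS =====

-- insertIdx as splice (no Mathlib lemma states this form)
theorem insertIdx_eq_splice {α : Type} (l : List α) (j : Nat) (a : α) (h : j ≤ l.length) :
    l.insertIdx j a = l.take j ++ a :: l.drop j := by
  induction l generalizing j with
  | nil => simp at h; simp [h]
  | cons x xs ih =>
    cases j with
    | zero => simp
    | succ k =>
      simp only [List.insertIdx_succ_cons, List.take_succ_cons, List.drop_succ_cons,
        ih k (by simpa using h)]
      rfl

-- A's scan, started at run, is the find-first-index scan on the remaining suffix
theorem aScan_eq_findIdx (nd : Int) (nc : List (String × Int))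
    (l : List (List (String × Int))) (run : Nat) (h : run ≤ l.length) :
    aScan nd nc l run =
      (if run + (l.drop run).findIdx (fun c => decide (nd < pvDist c)) < l.length then
        (l.insertIdx (run + (l.drop run).findIdx (fun c => decide (nd < pvDist c))) nc, -1)
      else (l, (l.length : Int))) := by
  fun_induction aScan nd nc l run with
  | case1 run hlt hcond =>
      rw [List.drop_eq_getElem_cons hlt, List.findIdx_cons]
      simp only [hcond, decide_true, cond_true, Nat.add_zero]
      rw [if_pos hlt]
  | case2 run hlt hcond ih =>
      rw [List.drop_eq_getElem_cons hlt, List.findIdx_cons]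
      simp only [hcond, decide_false, cond_false]
      rw [ih (by omega)]
      have harith : run + ((l.drop (run + 1)).findIdx (fun c => decide (nd < pvDist c)) + 1)
          = run + 1 + (l.drop (run + 1)).findIdx (fun c => decide (nd < pvDist c)) := by omega
      rw [harith]
  | case3 run hlt =>
      have hr : run = l.length := by omega
      subst hr
      simp

-- A's whole insertion phase on the kept list is a splice at the find-first index
theorem aPhase_eq_splice (nd : Int) (nc : List (String × Int))
    (kept : List (List (String × Int))) :
    (if (aScan nd nc kept 0).2 = ((aScan nd nc kept 0).1.length : Int)
     then (aScan nd nc kept 0).1 ++ [nc] else (aScan nd nc kept 0).1)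
    = kept.take (kept.findIdx (fun c => decide (nd < pvDist c))) ++
      nc :: kept.drop (kept.findIdx (fun c => decide (nd < pvDist c))) := by
  rw [aScan_eq_findIdx nd nc kept 0 (by omega)]
  simp only [List.drop_zero, Nat.zero_add]
  set j := kept.findIdx (fun c => decide (nd < pvDist c)) with hj
  have hjle : j ≤ kept.length := List.findIdx_le_length
  by_cases hfound : j < kept.length
  · rw [if_pos hfound]
    have hA : ¬ ((kept.insertIdx j nc, (-1 : Int)).2
        = ((kept.insertIdx j nc).length : Int)) := by
      show ¬ ((-1 : Int) = ((kept.insertIdx j nc).length : Int))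
      omega
    simp only [hA, if_false]
    exact insertIdx_eq_splice kept j nc hjle
  · rw [if_neg hfound]
    have hjlen : j = kept.length := by omega
    rw [if_pos rfl, hjlen]
    simp

-- B's fused recursion is the same splice on the first `budget` elements
theorem bPlace_eq_splice (nc : List (String × Int)) (cities : List (List (String × Int)))
    (budget : Nat) :
    bPlace nc cities budget =
      (cities.take budget).take
          ((cities.take budget).findIdx (fun c => decide (pvDist nc < pvDist c))) ++
        nc :: (cities.take budget).drop
          ((cities.take budget).findIdx (fun c => decide (pvDist nc < pvDist c))) := by
  induction cities generalizing budget with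
  | nil => simp [bPlace]
  | cons head rest ih =>
    cases budget with
    | zero => simp [bPlace]
    | succ b =>
      simp only [bPlace, List.take_succ_cons, List.findIdx_cons]
      by_cases hc : pvDist nc < pvDist head
      · simp [hc]
      · simp only [hc, decide_false, cond_false, ih b, List.take_succ_cons,
          List.drop_succ_cons]
        rfl

-- ===== VERDICT (by name: the statement is the Claim_ definition above) =====
theorem add_if_nearer_py_spec : Claim_equal_add_if_nearer_py := by
  intro num_cities lst nc _hdom _hpre
  unfold Spec_add_if_nearer_py add_if_nearer_py add_if_nearer_py_alt
  by_cases hemp : lst.length = 0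
  · obtain rfl := List.length_eq_zero_iff.mp hemp
    simp
  · simp only [hemp, if_false]
    by_cases hcond : pvDist nc < pvDist (PySem.List.pyGetD lst (-1) [])
    · have hble : ¬ (pvDist (PySem.List.pyGetD lst (-1) []) ≤ pvDist nc) := not_le.mpr hcond
      rw [if_pos hcond, if_neg hble]
      have hne : lst ≠ [] := by intro h; simp [h] at hemp
      have hpop : PySem.List.pop? lst = some (lst.getLast hne, lst.dropLast) := by
        conv_lhs => rw [← List.dropLast_concat_getLast hne]
        rw [PySem.List.pop?_last]
      -- A's kept list = lst.take budget, B's budget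
      have hkept :
          (if (lst.length : Int) ≥ num_cities then
            match PySem.List.pop? lst (-1) with
            | some (_, rest) => rest
            | none => lst
          else lst)
          = lst.take (if (lst.length : Int) ≥ num_cities then lst.length - 1
                      else lst.length) := by
        by_cases hcap : (lst.length : Int) ≥ num_cities
        · rw [if_pos hcap, if_pos hcap, hpop, List.dropLast_eq_take]
        · rw [if_neg hcap, if_neg hcap, List.take_length]
      rw [hkept, aPhase_eq_splice, bPlace_eq_splice]
    · rw [if_neg hcond, if_pos (not_lt.mp hcond)]
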